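-- pv_equiv track=rewrite | github.com/AsteroidMe/Kriptografi | quiz.py | form_pairs
-- ===== SOURCE A (Python) =====
-- def form_pairs(plaintext):
--     pairs = []
--     i = 0
--     while i < len(plaintext):
--         a = plaintext[i]
--         b = 'X' if (i + 1 == len(plaintext)) else plaintext[i + 1]
--
--         if a == b:
--             pairs.append((a, 'X'))
--             i += 1
--         else:
--             pairs.append((a, b))
--             i += 2
--
--     return pairs
-- ===== SOURCE B (Python) =====
-- def form_pairs(plaintext):
--     pairs = []
--     pending = None
--     for c in plaintext:
--         if pending is None:
--             pending = c
--         elif pending == c: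
--             pairs.append((pending, 'X'))
--             pending = c
--         else:
--             pairs.append((pending, c))
--             pending = None
--     if pending is not None:
--         pairs.append((pending, 'X'))
--     return pairs
-- ===== Notes on version B (the rewrite author's own statement) =====
-- stated objective: idiomatic
-- what changed: Replaces the index-based while loop with lookahead (plaintext[i], plaintext[i+1], i+=1/2) by a single streaming for-loop over the characters carrying a pending first-of-pair in a state variable, with trailing-pending padding after the loop.
import Mathlib
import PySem

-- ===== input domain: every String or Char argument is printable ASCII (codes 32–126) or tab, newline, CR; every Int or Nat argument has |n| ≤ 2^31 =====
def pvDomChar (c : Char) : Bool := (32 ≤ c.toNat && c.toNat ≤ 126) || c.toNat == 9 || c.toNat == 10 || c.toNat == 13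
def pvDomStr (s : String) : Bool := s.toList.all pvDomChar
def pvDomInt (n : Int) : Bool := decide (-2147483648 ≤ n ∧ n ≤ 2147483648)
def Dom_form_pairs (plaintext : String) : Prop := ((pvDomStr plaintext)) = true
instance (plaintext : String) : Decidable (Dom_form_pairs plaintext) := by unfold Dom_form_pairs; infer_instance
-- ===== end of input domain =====

-- B: one streaming pass carrying a pending first-of-pair instead of A's index arithmetic with lookahead (same output).
-- ===== PORT A =====
-- while-loop of A as recursion on the remaining suffix of characters (i ↦ suffix from i)
def formPairsGoA : List Char → List (String × String)
  | [] => []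
  | [a] =>
      -- i + 1 == len: b = 'X'; both branches append (a, 'X') and the loop ends
      (a.toString, "X") :: []
  | a :: b :: rest =>
      if a == b then (a.toString, "X") :: formPairsGoA (b :: rest)
      else (a.toString, b.toString) :: formPairsGoA rest

def form_pairs (plaintext : String) : List (String × String) :=
  formPairsGoA plaintext.toList

-- ===== PORT B =====
-- for-loop of B as recursion on the characters carrying the pending state
def formPairsGoB : Option Char → List Char → List (String × String)
  | none, [] => []
  | some p, [] => [(p.toString, "X")]
  | none, c :: rest => formPairsGoB (some c) rest
  | some p, c :: rest =>
      if p == c then (p.toString, "X") :: formPairsGoB (some c) rest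
      else (p.toString, c.toString) :: formPairsGoB none rest

def form_pairs_alt (plaintext : String) : List (String × String) :=
  formPairsGoB none plaintext.toList

-- ===== PRECONDITION & SPEC =====
def Spec_form_pairs (plaintext : String) (out : List (String × String)) : Prop := out = form_pairs_alt plaintext
instance (plaintext : String) (out : List (String × String)) : Decidable (Spec_form_pairs plaintext out) := by unfold Spec_form_pairs; infer_instance

-- ===== CLAIM =====
def Claim_equal_form_pairs : Prop := ∀ (plaintext : String), Dom_form_pairs plaintext → Spec_form_pairs plaintext (form_pairs plaintext)

-- ===== LEMMAS AND PROOFS =====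
theorem formPairsGo_eq (l : List Char) :
    formPairsGoA l = formPairsGoB none l ∧
    ∀ p, formPairsGoA (p :: l) = formPairsGoB (some p) l := by
  induction l with
  | nil => exact ⟨rfl, fun p => rfl⟩
  | cons c rest ih =>
    refine ⟨?_, fun p => ?_⟩
    · rw [show formPairsGoB none (c :: rest) = formPairsGoB (some c) rest from rfl]
      exact ih.2 c
    · by_cases h : p = c
      · subst h
        simpa [formPairsGoA, formPairsGoB] using ih.2 p
      · simp [formPairsGoA, formPairsGoB, h, ih.1]

-- ===== VERDICT =====
theorem form_pairs_spec : Claim_equal_form_pairs := by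
  intro s _
  unfold Spec_form_pairs form_pairs form_pairs_alt
  exact (formPairsGo_eq s.toList).1
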